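-- pv_equiv track=rewrite | github.com/hajar-assim/GenerationOfChessVariantsDEVs | scripts/board_metrics.py | hole_count
-- ===== SOURCE A (Python) =====
-- from collections import deque
--
-- def _bfs_region(board, visited, start_r, start_c, target):
--     """BFS flood fill, returns the set of cells in the connected region."""
--     rows, cols = len(board), len(board[0])
--     queue = deque([(start_r, start_c)])
--     visited[start_r][start_c] = True
--     region = set()
--     region.add((start_r, start_c))
--
--     while queue:
--         r, c = queue.popleft()
--         for dr, dc in [(-1, 0), (1, 0), (0, -1), (0, 1)]:
--             nr, nc = r + dr, c + dc
--             if 0 <= nr < rows and 0 <= nc < cols: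
--                 if not visited[nr][nc] and board[nr][nc] == target:
--                     visited[nr][nc] = True
--                     queue.append((nr, nc))
--                     region.add((nr, nc))
--
--     return region
--
-- def hole_count(board):
--     """Number of enclosed empty regions (holes).
--
--     An empty region is a "hole" if it does not touch the grid border.
--     Uses 4-connected BFS on empty (0) cells.
--     """
--     rows, cols = len(board), len(board[0])
--     visited = [[False] * cols for _ in range(rows)]
--     holes = 0
--
--     for r in range(rows):
--         for c in range(cols):
--             if board[r][c] == 0 and not visited[r][c]:
--                 region = _bfs_region(board, visited, r, c, target=0)
--                 # check if region touches any border
--                 touches_border = any(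
--                     r == 0 or r == rows - 1 or c == 0 or c == cols - 1
--                     for r, c in region
--                 )
--                 if not touches_border:
--                     holes += 1
--
--     return holes
-- ===== SOURCE B (Python) =====
-- def hole_count(board):
--     """Number of enclosed empty regions (holes).
--
--     Union-find over grid cells: union each empty cell with its empty right/down
--     neighbours, mark border-touching component roots in a second pass, then
--     count the distinct unmarked roots of empty cells.
--     """
--     rows, cols = len(board), len(board[0])
--     parent = list(range(rows * cols))
--
--     def find(x):
--         while parent[x] != x:
--             x = parent[x]
--         return x
--
--     def union(a, b):
--         ra, rb = find(a), find(b)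
--         if ra != rb:
--             if ra < rb:
--                 parent[rb] = ra
--             else:
--                 parent[ra] = rb
--
--     for r in range(rows):
--         for c in range(cols):
--             if board[r][c] == 0:
--                 if r + 1 < rows and board[r + 1][c] == 0:
--                     union(r * cols + c, (r + 1) * cols + c)
--                 if c + 1 < cols and board[r][c + 1] == 0:
--                     union(r * cols + c, r * cols + c + 1)
--
--     border = set()
--     for r in range(rows):
--         for c in range(cols):
--             if board[r][c] == 0 and (r == 0 or r == rows - 1 or c == 0 or c == cols - 1):
--                 border.add(find(r * cols + c))
--
--     roots = set()
--     for r in range(rows):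
--         for c in range(cols):
--             if board[r][c] == 0:
--                 rt = find(r * cols + c)
--                 if rt not in border:
--                     roots.add(rt)
--     return len(roots)
-- ===== Notes on version B (the rewrite author's own statement) =====
-- stated objective: alternative
-- what changed: Replaces per-region BFS flood fill with a queue, a per-region set and a border test by a union-find over flat cell indices: one pass unions each empty cell with its empty right/down neighbour, a second pass marks border-touching component roots, and the answer is the number of distinct unmarked roots of empty cells.
import Mathlib
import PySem

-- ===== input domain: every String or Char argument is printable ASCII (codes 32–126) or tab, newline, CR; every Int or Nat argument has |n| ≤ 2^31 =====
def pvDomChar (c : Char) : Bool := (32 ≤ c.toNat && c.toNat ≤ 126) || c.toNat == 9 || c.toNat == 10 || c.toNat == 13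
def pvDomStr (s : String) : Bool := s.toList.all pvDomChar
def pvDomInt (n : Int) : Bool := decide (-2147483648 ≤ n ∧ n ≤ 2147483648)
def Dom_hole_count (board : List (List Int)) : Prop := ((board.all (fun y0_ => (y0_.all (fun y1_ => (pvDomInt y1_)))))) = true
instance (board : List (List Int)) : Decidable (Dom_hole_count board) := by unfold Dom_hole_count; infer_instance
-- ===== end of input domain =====

-- B replaces A's per-region BFS flood fill (queue + per-region set + border test) by a
-- union-find over cell indices (union empty right/down neighbours, mark border roots,
-- count distinct unmarked roots); same return value, no speed claim.

-- ===== PORT A =====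
-- Cell-level helpers: the board read board[r][c] and the 4-neighbour list.

def pvNbrs (p : Int × Int) : List (Int × Int) :=
  [(p.1 - 1, p.2), (p.1 + 1, p.2), (p.1, p.2 - 1), (p.1, p.2 + 1)]

def pvAt (board : List (List Int)) (p : Int × Int) : Option Int :=
  (PySem.List.pyGet? board p.1).bind (fun row => PySem.List.pyGet? row p.2)

-- the inner `for dr, dc in ...` loop of _bfs_region: visits the four neighbours,
-- returning the enlarged visited list and the list of newly visited cells
def pvExpand (board : List (List Int)) (rows cols : Int) :
    List (Int × Int) → List (Int × Int) → List (Int × Int) × List (Int × Int)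
  | visited, [] => (visited, [])
  | visited, p :: ps =>
    if (0 ≤ p.1 ∧ p.1 < rows ∧ 0 ≤ p.2 ∧ p.2 < cols) ∧ p ∉ visited ∧ pvAt board p = some 0 then
      let r := pvExpand board rows cols (p :: visited) ps
      (r.1, p :: r.2)
    else
      pvExpand board rows cols visited ps

theorem pvExpand_mem (board : List (List Int)) (rows cols : Int) :
    ∀ (ds visited : List (Int × Int)) (q : Int × Int),
      q ∈ (pvExpand board rows cols visited ds).1 ↔
        q ∈ visited ∨ q ∈ (pvExpand board rows cols visited ds).2 := by
  intro ds
  induction ds with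
  | nil => intro visited q; simp [pvExpand]
  | cons p ps ih =>
    intro visited q
    by_cases h : (0 ≤ p.1 ∧ p.1 < rows ∧ 0 ≤ p.2 ∧ p.2 < cols) ∧ p ∉ visited ∧ pvAt board p = some 0
    · simp only [pvExpand, if_pos h]
      rw [ih]
      simp [List.mem_cons]
      tauto
    · simp only [pvExpand, if_neg h]
      exact ih visited q

theorem pvExpand_new (board : List (List Int)) (rows cols : Int) :
    ∀ (ds visited : List (Int × Int)) (q : Int × Int),
      q ∈ (pvExpand board rows cols visited ds).2 →
        q ∉ visited ∧ (0 ≤ q.1 ∧ q.1 < rows ∧ 0 ≤ q.2 ∧ q.2 < cols) ∧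
          pvAt board q = some 0 ∧ q ∈ ds := by
  intro ds
  induction ds with
  | nil => intro visited q h; simp [pvExpand] at h
  | cons p ps ih =>
    intro visited q hq
    by_cases h : (0 ≤ p.1 ∧ p.1 < rows ∧ 0 ≤ p.2 ∧ p.2 < cols) ∧ p ∉ visited ∧ pvAt board p = some 0
    · simp only [pvExpand, if_pos h] at hq
      rcases List.mem_cons.1 hq with rfl | hq
      · exact ⟨h.2.1, h.1, h.2.2, List.mem_cons_self ..⟩
      · have := ih (p :: visited) q hq
        refine ⟨fun hv => this.1 (List.mem_cons_of_mem _ hv), this.2.1, this.2.2.1,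
          List.mem_cons_of_mem _ this.2.2.2⟩
    · simp only [pvExpand, if_neg h] at hq
      have := ih visited q hq
      exact ⟨this.1, this.2.1, this.2.2.1, List.mem_cons_of_mem _ this.2.2.2⟩

theorem pvExpand_nil (board : List (List Int)) (rows cols : Int) :
    ∀ (ds visited : List (Int × Int)),
      (pvExpand board rows cols visited ds).2 = [] →
      (pvExpand board rows cols visited ds).1 = visited := by
  intro ds
  induction ds with
  | nil => intro visited _; simp [pvExpand]
  | cons p ps ih =>
    intro visited hnil
    by_cases h : (0 ≤ p.1 ∧ p.1 < rows ∧ 0 ≤ p.2 ∧ p.2 < cols) ∧ p ∉ visited ∧ pvAt board p = some 0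
    · simp only [pvExpand, if_pos h] at hnil
      simp at hnil
    · simp only [pvExpand, if_neg h] at hnil ⊢
      exact ih visited hnil

def pvKey (rows cols : Int) (visited : List (Int × Int)) : Nat :=
  ((Finset.range rows.toNat ×ˢ Finset.range cols.toNat).filter
    (fun q => ((q.1 : Int), (q.2 : Int)) ∉ visited)).card

theorem pvKey_lt (rows cols : Int) (v v' : List (Int × Int)) (q0 : Int × Int)
    (h : ∀ p, p ∈ v → p ∈ v') (hq0 : q0 ∈ v') (hq0v : q0 ∉ v)
    (hb : 0 ≤ q0.1 ∧ q0.1 < rows ∧ 0 ≤ q0.2 ∧ q0.2 < cols) :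
    pvKey rows cols v' < pvKey rows cols v := by
  apply Finset.card_lt_card
  constructor
  · intro q hq
    simp only [Finset.mem_filter] at hq ⊢
    exact ⟨hq.1, fun hmem => hq.2 (h _ hmem)⟩
  · intro hsub
    have h1 : (q0.1.toNat, q0.2.toNat) ∈
        (Finset.range rows.toNat ×ˢ Finset.range cols.toNat).filter
          (fun q => ((q.1 : Int), (q.2 : Int)) ∉ v) := by
      simp only [Finset.mem_filter, Finset.mem_product, Finset.mem_range]
      refine ⟨⟨by omega, by omega⟩, ?_⟩
      have : ((q0.1.toNat : Int), (q0.2.toNat : Int)) = q0 := by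
        obtain ⟨a, b⟩ := q0
        simp only [Prod.mk.injEq]
        constructor <;> omega
      rw [this]; exact hq0v
    have h2 := hsub h1
    simp only [Finset.mem_filter] at h2
    apply h2.2
    have : ((q0.1.toNat : Int), (q0.2.toNat : Int)) = q0 := by
      obtain ⟨a, b⟩ := q0
      simp only [Prod.mk.injEq]
      constructor <;> omega
    rw [this]; exact hq0

-- the `while queue:` loop of _bfs_region
def pvBFS (board : List (List Int)) (rows cols : Int) :
    List (Int × Int) → List (Int × Int) → List (Int × Int) →
      List (Int × Int) × List (Int × Int)
  | visited, [], region => (visited, region)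
  | visited, p :: qs, region =>
    let e := pvExpand board rows cols visited (pvNbrs p)
    pvBFS board rows cols e.1 (qs ++ e.2) (region ++ e.2)
termination_by visited queue _ => (pvKey rows cols visited, queue.length)
decreasing_by
  rcases heq : (pvExpand board rows cols visited (pvNbrs p)).2 with _ | ⟨q0, rest⟩
  · have h1 := pvExpand_nil board rows cols (pvNbrs p) visited heq
    simp only [h1]
    apply Prod.Lex.right
    simp
  · have hmem : q0 ∈ (pvExpand board rows cols visited (pvNbrs p)).2 := by
      rw [heq]; exact List.mem_cons_self ..
    have hnew := pvExpand_new board rows cols (pvNbrs p) visited q0 hmem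
    have hin : q0 ∈ (pvExpand board rows cols visited (pvNbrs p)).1 :=
      (pvExpand_mem board rows cols (pvNbrs p) visited q0).2 (Or.inr hmem)
    apply Prod.Lex.left
    exact pvKey_lt rows cols visited _ q0
      (fun x hx => (pvExpand_mem board rows cols (pvNbrs p) visited x).2 (Or.inl hx)) hin hnew.1 hnew.2.1

-- the body of A's double scan loop, at cell p with state (visited-as-list, holes)
def pvAStep (board : List (List Int)) (rows cols : Int)
    (st : List (Int × Int) × Int) (p : Int × Int) : List (Int × Int) × Int :=
  if pvAt board p = some 0 ∧ p ∉ st.1 then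
    let br := pvBFS board rows cols (p :: st.1) [p] [p]
    let touches := br.2.any (fun q => decide (q.1 = 0 ∨ q.1 = rows - 1 ∨ q.2 = 0 ∨ q.2 = cols - 1))
    (br.1, if touches then st.2 else st.2 + 1)
  else st

def hole_count (board : List (List Int)) : Int :=
  let rows : Int := board.length
  let cols : Int := (board.headD []).length
  ((PySem.List.pyRange 0 rows 1).foldl (fun st r =>
    (PySem.List.pyRange 0 cols 1).foldl (fun st c => pvAStep board rows cols st (r, c)) st)
    (([] : List (Int × Int)), (0 : Int))).2

-- ===== PORT B =====
-- union-find over flat cell indices r*cols+c (a Python list of parents, here a function)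

def pvIdx (colsN : Nat) (p : Int × Int) : Nat := p.1.toNat * colsN + p.2.toNat

-- `while parent[x] != x: x = parent[x]`; fuel x+1 is a totality guard only:
-- parents always point to smaller indices, so the chain from x has length ≤ x
def pvFindF (parent : Nat → Nat) : Nat → Nat → Nat
  | 0, x => x
  | f + 1, x => if parent x = x then x else pvFindF parent f (parent x)

def pvRootOf (parent : Nat → Nat) (x : Nat) : Nat := pvFindF parent (x + 1) x

def pvUnionF (parent : Nat → Nat) (a b : Nat) : Nat → Nat :=
  if pvRootOf parent a = pvRootOf parent b then parent
  else if pvRootOf parent a < pvRootOf parent b then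
    (fun y => if y = pvRootOf parent b then pvRootOf parent a else parent y)
  else
    (fun y => if y = pvRootOf parent a then pvRootOf parent b else parent y)

-- the body of B's first loop: union an empty cell with its empty down/right neighbours
def pvBStep (board : List (List Int)) (rows cols : Int) (colsN : Nat)
    (par : Nat → Nat) (p : Int × Int) : Nat → Nat :=
  if pvAt board p = some 0 then
    let par1 := if p.1 + 1 < rows ∧ pvAt board (p.1 + 1, p.2) = some 0 then
        pvUnionF par (pvIdx colsN p) (pvIdx colsN (p.1 + 1, p.2)) else par
    if p.2 + 1 < cols ∧ pvAt board (p.1, p.2 + 1) = some 0 then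
        pvUnionF par1 (pvIdx colsN p) (pvIdx colsN (p.1, p.2 + 1)) else par1
  else par

-- the body of B's second loop: collect roots of empty border cells
def pvDStep (board : List (List Int)) (rows cols : Int) (colsN : Nat) (pf : Nat → Nat)
    (bs : List Nat) (p : Int × Int) : List Nat :=
  if pvAt board p = some 0 ∧ (p.1 = 0 ∨ p.1 = rows - 1 ∨ p.2 = 0 ∨ p.2 = cols - 1) then
    if pvRootOf pf (pvIdx colsN p) ∈ bs then bs else pvRootOf pf (pvIdx colsN p) :: bs
  else bs

-- the body of B's third loop: collect roots of empty cells whose root is not a border root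
def pvRStep (board : List (List Int)) (rows cols : Int) (colsN : Nat) (pf : Nat → Nat)
    (bord : List Nat) (rs : List Nat) (p : Int × Int) : List Nat :=
  if pvAt board p = some 0 then
    if pvRootOf pf (pvIdx colsN p) ∉ bord then
      if pvRootOf pf (pvIdx colsN p) ∈ rs then rs else pvRootOf pf (pvIdx colsN p) :: rs
    else rs
  else rs

def hole_count_alt (board : List (List Int)) : Int :=
  let rows : Int := board.length
  let cols : Int := (board.headD []).length
  let colsN : Nat := (board.headD []).length
  let parent := (PySem.List.pyRange 0 rows 1).foldl (fun par r =>
    (PySem.List.pyRange 0 cols 1).foldl (fun par c => pvBStep board rows cols colsN par (r, c)) par)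
    (fun x => x)
  let border := (PySem.List.pyRange 0 rows 1).foldl (fun bs r =>
    (PySem.List.pyRange 0 cols 1).foldl (fun bs c => pvDStep board rows cols colsN parent bs (r, c)) bs)
    ([] : List Nat)
  let roots := (PySem.List.pyRange 0 rows 1).foldl (fun rs r =>
    (PySem.List.pyRange 0 cols 1).foldl (fun rs c => pvRStep board rows cols colsN parent border rs (r, c)) rs)
    ([] : List Nat)
  (roots.length : Int)

-- ===== PRECONDITION & SPEC =====
-- Pre_ excludes exactly the inputs where the Python A raises IndexError: the empty board
-- (len(board[0])) and boards with a row shorter than the first row (board[r][c] read).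
def Pre_hole_count (board : List (List Int)) : Prop :=
  board ≠ [] ∧ ∀ row ∈ board, (board.headD []).length ≤ row.length
instance (board : List (List Int)) : Decidable (Pre_hole_count board) := by
  unfold Pre_hole_count; infer_instance

def pvWitness_hole_count : List (List Int) := [[1, 1, 1], [1, 0, 1], [1, 1, 1]]

def Spec_hole_count (board : List (List Int)) (out : Int) : Prop := out = hole_count_alt board
instance (board : List (List Int)) (out : Int) : Decidable (Spec_hole_count board out) := by
  unfold Spec_hole_count; infer_instance

-- ===== CLAIM (what is proved, stated in full; the proofs are below) =====
def Claim_equal_hole_count : Prop := ∀ (board : List (List Int)), Dom_hole_count board → Pre_hole_count board → Spec_hole_count board (hole_count board)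

-- ===== LEMMAS AND PROOFS =====

theorem pvExpand_complete (board : List (List Int)) (rows cols : Int) :
    ∀ (ds visited : List (Int × Int)) (q : Int × Int), q ∈ ds →
      (0 ≤ q.1 ∧ q.1 < rows ∧ 0 ≤ q.2 ∧ q.2 < cols) → pvAt board q = some 0 →
      q ∈ (pvExpand board rows cols visited ds).1 := by
  intro ds
  induction ds with
  | nil => intro visited q h; simp at h
  | cons p ps ih =>
    intro visited q hq hb h0
    by_cases h : (0 ≤ p.1 ∧ p.1 < rows ∧ 0 ≤ p.2 ∧ p.2 < cols) ∧ p ∉ visited ∧ pvAt board p = some 0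
    · simp only [pvExpand, if_pos h]
      rcases List.mem_cons.1 hq with rfl | hq
      · exact (pvExpand_mem board rows cols ps (q :: visited) q).2 (Or.inl (List.mem_cons_self ..))
      · exact ih (p :: visited) q hq hb h0
    · simp only [pvExpand, if_neg h]
      rcases List.mem_cons.1 hq with rfl | hq
      · have hpv : q ∈ visited := by
          by_contra hnv
          exact h ⟨hb, hnv, h0⟩
        exact (pvExpand_mem board rows cols ps visited q).2 (Or.inl hpv)
      · exact ih visited q hq hb h0

def pvInB (rows cols : Int) (p : Int × Int) : Prop :=
  0 ≤ p.1 ∧ p.1 < rows ∧ 0 ≤ p.2 ∧ p.2 < cols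

def pvEmpty (board : List (List Int)) (rows cols : Int) (p : Int × Int) : Prop :=
  pvInB rows cols p ∧ pvAt board p = some 0

def pvAdj (board : List (List Int)) (rows cols : Int) (p q : Int × Int) : Prop :=
  pvEmpty board rows cols p ∧ pvEmpty board rows cols q ∧ q ∈ pvNbrs p

def pvReach (board : List (List Int)) (rows cols : Int) (p q : Int × Int) : Prop :=
  Relation.ReflTransGen (pvAdj board rows cols) p q

def pvClosed (board : List (List Int)) (rows cols : Int) (V : List (Int × Int)) : Prop :=
  ∀ p ∈ V, ∀ q, pvAdj board rows cols p q → q ∈ V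

def pvIsBorder (rows cols : Int) (p : Int × Int) : Prop :=
  p.1 = 0 ∨ p.1 = rows - 1 ∨ p.2 = 0 ∨ p.2 = cols - 1

def pvBord (board : List (List Int)) (rows cols : Int) (p : Int × Int) : Prop :=
  ∃ b, pvIsBorder rows cols b ∧ pvEmpty board rows cols b ∧ pvReach board rows cols b p

theorem pvNbrs_symm (p q : Int × Int) (h : q ∈ pvNbrs p) : p ∈ pvNbrs q := by
  obtain ⟨a, b⟩ := p
  obtain ⟨c, d⟩ := q
  simp only [pvNbrs, List.mem_cons, Prod.mk.injEq, List.not_mem_nil,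
    or_false] at h ⊢
  omega

theorem pvAdj_symm (board : List (List Int)) (rows cols : Int) :
    Symmetric (pvAdj board rows cols) := by
  intro p q h
  exact ⟨h.2.1, h.1, pvNbrs_symm p q h.2.2⟩

theorem pvReach_symm (board : List (List Int)) (rows cols : Int) {p q : Int × Int}
    (h : pvReach board rows cols p q) : pvReach board rows cols q p :=
  Relation.ReflTransGen.symmetric (pvAdj_symm board rows cols) h

theorem pvReach_empty (board : List (List Int)) (rows cols : Int) {p q : Int × Int}
    (he : pvEmpty board rows cols p) (h : pvReach board rows cols p q) :
    pvEmpty board rows cols q := by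
  induction h with
  | refl => exact he
  | tail _ hadj _ => exact hadj.2.1

theorem pvClosed_reach (board : List (List Int)) (rows cols : Int)
    {V : List (Int × Int)} (hC : pvClosed board rows cols V) {p q : Int × Int}
    (hp : p ∈ V) (hr : pvReach board rows cols p q) : q ∈ V := by
  induction hr with
  | refl => exact hp
  | tail _ hadj ih => exact hC _ ih _ hadj

theorem pvBord_congr (board : List (List Int)) (rows cols : Int) {p q : Int × Int}
    (h : pvReach board rows cols p q) :
    pvBord board rows cols p ↔ pvBord board rows cols q := by
  constructor
  · rintro ⟨b, h1, h2, h3⟩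
    exact ⟨b, h1, h2, Relation.ReflTransGen.trans h3 h⟩
  · rintro ⟨b, h1, h2, h3⟩
    exact ⟨b, h1, h2, Relation.ReflTransGen.trans h3 (pvReach_symm board rows cols h)⟩

theorem pvBFS_loop (board : List (List Int)) (rows cols : Int) :
    ∀ (visited queue region : List (Int × Int)),
      (∀ q ∈ queue, pvEmpty board rows cols q ∧ q ∈ visited) →
      (∀ x ∈ visited, x ∈ queue ∨ ∀ y, pvAdj board rows cols x y → y ∈ visited) →
      (∀ p, p ∈ (pvBFS board rows cols visited queue region).1 →
          p ∈ visited ∨ ∃ q ∈ queue, pvReach board rows cols q p) ∧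
      (∀ p ∈ visited, p ∈ (pvBFS board rows cols visited queue region).1) ∧
      pvClosed board rows cols (pvBFS board rows cols visited queue region).1 ∧
      (∀ p, p ∈ (pvBFS board rows cols visited queue region).2 ↔
          p ∈ region ∨ (p ∈ (pvBFS board rows cols visited queue region).1 ∧ p ∉ visited)) := by
  intro visited queue region
  induction visited, queue, region using pvBFS.induct board rows cols with
  | case1 visited region =>
    intro _ inv2
    simp only [pvBFS]
    refine ⟨fun p hp => Or.inl hp, fun p hp => hp, ?_, ?_⟩
    · intro x hx y hy
      rcases inv2 x hx with h | h
      · simp at h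
      · exact h y hy
    · intro p
      tauto
  | case2 visited p qs region e ih =>
    intro inv1 inv2
    rw [pvBFS]
    simp only [e] at ih
    set E := pvExpand board rows cols visited (pvNbrs p) with hE
    have hmem : ∀ q, q ∈ E.1 ↔ q ∈ visited ∨ q ∈ E.2 :=
      pvExpand_mem board rows cols (pvNbrs p) visited
    have hnew := pvExpand_new board rows cols (pvNbrs p) visited
    have hcompl := pvExpand_complete board rows cols (pvNbrs p) visited
    have hpE : pvEmpty board rows cols p := (inv1 p (List.mem_cons_self ..)).1
    have hnewEmpty : ∀ q ∈ E.2, pvEmpty board rows cols q := fun q hq =>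
      ⟨(hnew q hq).2.1, (hnew q hq).2.2.1⟩
    have hadj : ∀ q ∈ E.2, pvAdj board rows cols p q := fun q hq =>
      ⟨hpE, hnewEmpty q hq, (hnew q hq).2.2.2⟩
    have inv1' : ∀ q ∈ qs ++ E.2, pvEmpty board rows cols q ∧ q ∈ E.1 := by
      intro q hq
      rcases List.mem_append.1 hq with h | h
      · exact ⟨(inv1 q (List.mem_cons_of_mem _ h)).1,
          (hmem q).2 (Or.inl (inv1 q (List.mem_cons_of_mem _ h)).2)⟩
      · exact ⟨hnewEmpty q h, (hmem q).2 (Or.inr h)⟩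
    have inv2' : ∀ x ∈ E.1, x ∈ qs ++ E.2 ∨
        ∀ y, pvAdj board rows cols x y → y ∈ E.1 := by
      intro x hx
      rcases (hmem x).1 hx with hxv | hxn
      · rcases inv2 x hxv with hq | hcl
        · rcases List.mem_cons.1 hq with rfl | hq2
          · right; intro y hy
            exact hcompl y hy.2.2 hy.2.1.1 hy.2.1.2
          · left; exact List.mem_append_left _ hq2
        · right; intro y hy; exact (hmem y).2 (Or.inl (hcl y hy))
      · left; exact List.mem_append_right _ hxn
    obtain ⟨A1, A2, A3, A4⟩ := ih inv1' inv2'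
    refine ⟨?_, ?_, A3, ?_⟩
    · intro x hx
      rcases A1 x hx with hE1 | ⟨q, hq, hr⟩
      · rcases (hmem x).1 hE1 with h | h
        · exact Or.inl h
        · exact Or.inr ⟨p, List.mem_cons_self .., Relation.ReflTransGen.single (hadj x h)⟩
      · rcases List.mem_append.1 hq with h | h
        · exact Or.inr ⟨q, List.mem_cons_of_mem _ h, hr⟩
        · exact Or.inr ⟨p, List.mem_cons_self ..,
            Relation.ReflTransGen.trans (Relation.ReflTransGen.single (hadj q h)) hr⟩
    · intro x hx
      exact A2 x ((hmem x).2 (Or.inl hx))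
    · intro x
      rw [A4 x]
      constructor
      · rintro (hx | ⟨h1, h2⟩)
        · rcases List.mem_append.1 hx with h | h
          · exact Or.inl h
          · exact Or.inr ⟨A2 x ((hmem x).2 (Or.inr h)), (hnew x h).1⟩
        · exact Or.inr ⟨h1, fun hv => h2 ((hmem x).2 (Or.inl hv))⟩
      · rintro (hx | ⟨h1, h2⟩)
        · exact Or.inl (List.mem_append_left _ hx)
        · by_cases hE1 : x ∈ E.1
          · rcases (hmem x).1 hE1 with h | h
            · exact absurd h h2
            · exact Or.inl (List.mem_append_right _ h)
          · exact Or.inr ⟨h1, hE1⟩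

theorem pvBFS_run (board : List (List Int)) (rows cols : Int)
    (V : List (Int × Int)) (s : Int × Int)
    (hC : pvClosed board rows cols V) (hsE : pvEmpty board rows cols s) (hsV : s ∉ V) :
    (∀ p, p ∈ (pvBFS board rows cols (s :: V) [s] [s]).1 ↔
        p ∈ V ∨ pvReach board rows cols s p) ∧
    (∀ p, p ∈ (pvBFS board rows cols (s :: V) [s] [s]).2 ↔
        pvReach board rows cols s p) ∧
    pvClosed board rows cols (pvBFS board rows cols (s :: V) [s] [s]).1 := by
  have inv1 : ∀ q ∈ [s], pvEmpty board rows cols q ∧ q ∈ s :: V := by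
    intro q hq
    rcases List.mem_singleton.1 hq with rfl
    exact ⟨hsE, List.mem_cons_self ..⟩
  have inv2 : ∀ x ∈ s :: V, x ∈ [s] ∨ ∀ y, pvAdj board rows cols x y → y ∈ s :: V := by
    intro x hx
    rcases List.mem_cons.1 hx with rfl | hxV
    · exact Or.inl (List.mem_singleton.2 rfl)
    · exact Or.inr fun y hy => List.mem_cons_of_mem _ (hC x hxV y hy)
  obtain ⟨A1, A2, A3, A4⟩ := pvBFS_loop board rows cols (s :: V) [s] [s] inv1 inv2
  have hdisj : ∀ p, pvReach board rows cols s p → p ∈ V → False := by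
    intro p hr hp
    exact hsV (pvClosed_reach board rows cols hC hp (pvReach_symm board rows cols hr))
  have hmem1 : ∀ p, p ∈ (pvBFS board rows cols (s :: V) [s] [s]).1 ↔
      p ∈ V ∨ pvReach board rows cols s p := by
    intro p
    constructor
    · intro hp
      rcases A1 p hp with hp' | ⟨q, hq, hr⟩
      · rcases List.mem_cons.1 hp' with rfl | h
        · exact Or.inr Relation.ReflTransGen.refl
        · exact Or.inl h
      · rcases List.mem_singleton.1 hq with rfl
        exact Or.inr hr
    · rintro (hp | hp)
      · exact A2 p (List.mem_cons_of_mem _ hp)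
      · exact pvClosed_reach board rows cols A3 (A2 s (List.mem_cons_self ..)) hp
  refine ⟨hmem1, ?_, A3⟩
  intro p
  rw [A4 p]
  constructor
  · rintro (hp | ⟨h1, h2⟩)
    · rcases List.mem_singleton.1 hp with rfl
      exact Relation.ReflTransGen.refl
    · rcases (hmem1 p).1 h1 with h | h
      · exact absurd (List.mem_cons_of_mem _ h) h2
      · exact h
  · intro hr
    by_cases hps : p = s
    · exact Or.inl (List.mem_singleton.2 hps)
    · refine Or.inr ⟨(hmem1 p).2 (Or.inr hr), ?_⟩
      intro hmem
      rcases List.mem_cons.1 hmem with rfl | h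
      · exact hps rfl
      · exact hdisj p hr h

-- ---------- union-find lemmas ----------

def pvGood (parent : Nat → Nat) : Prop := ∀ y, parent y ≤ y

theorem pvFindF_congr (parent : Nat → Nat) (hG : pvGood parent) :
    ∀ (x f g : Nat), x < f → x < g → pvFindF parent f x = pvFindF parent g x := by
  intro x
  induction x using Nat.strong_induction_on with
  | _ x ih =>
    intro f g hf hg
    obtain ⟨f', rfl⟩ : ∃ f', f = f' + 1 := ⟨f - 1, by omega⟩
    obtain ⟨g', rfl⟩ : ∃ g', g = g' + 1 := ⟨g - 1, by omega⟩
    by_cases hx : parent x = x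
    · simp [pvFindF, hx]
    · have hlt : parent x < x := lt_of_le_of_ne (hG x) hx
      simp only [pvFindF, if_neg hx]
      exact ih (parent x) hlt f' g' (by omega) (by omega)

theorem pvRootOf_fix (parent : Nat → Nat) (x : Nat) (h : parent x = x) :
    pvRootOf parent x = x := by
  simp [pvRootOf, pvFindF, h]

theorem pvRootOf_step (parent : Nat → Nat) (hG : pvGood parent) (x : Nat)
    (h : parent x ≠ x) : pvRootOf parent x = pvRootOf parent (parent x) := by
  have hlt : parent x < x := lt_of_le_of_ne (hG x) h
  have h1 : pvFindF parent (x + 1) x = pvFindF parent x (parent x) := by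
    simp [pvFindF, h]
  simp only [pvRootOf]
  rw [h1]
  exact pvFindF_congr parent hG (parent x) x (parent x + 1) (by omega) (by omega)

theorem pvRootOf_spec (parent : Nat → Nat) (hG : pvGood parent) (x : Nat) :
    parent (pvRootOf parent x) = pvRootOf parent x ∧ pvRootOf parent x ≤ x := by
  induction x using Nat.strong_induction_on with
  | _ x ih =>
    by_cases hx : parent x = x
    · rw [pvRootOf_fix parent x hx]
      exact ⟨hx, le_refl x⟩
    · have hlt : parent x < x := lt_of_le_of_ne (hG x) hx
      rw [pvRootOf_step parent hG x hx]
      obtain ⟨h1, h2⟩ := ih (parent x) hlt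
      exact ⟨h1, by omega⟩

theorem pvRoot_update (parent parent' : Nat → Nat) (hG : pvGood parent) (r s : Nat)
    (hdef : ∀ y, parent' y = if y = r then s else parent y)
    (hr : parent r = r) (hs : parent s = s) (hsr : s < r) :
    ∀ x, pvRootOf parent' x = if pvRootOf parent x = r then s else pvRootOf parent x := by
  have hsne : s ≠ r := Nat.ne_of_lt hsr
  have hG' : pvGood parent' := by
    intro y
    rw [hdef y]
    split_ifs with hy
    · omega
    · exact hG y
  intro x
  induction x using Nat.strong_induction_on with
  | _ x ih =>
    by_cases hxr : x = r
    · subst hxr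
      have hval : parent' x = s := by rw [hdef x, if_pos rfl]
      have hne : parent' x ≠ x := by rw [hval]; exact hsne
      rw [pvRootOf_step parent' hG' x hne, hval]
      have hfixs : parent' s = s := by rw [hdef s, if_neg hsne]; exact hs
      rw [pvRootOf_fix parent' s hfixs, pvRootOf_fix parent x hr, if_pos rfl]
    · by_cases hpx : parent x = x
      · have hfix : parent' x = x := by rw [hdef x, if_neg hxr]; exact hpx
        rw [pvRootOf_fix parent' x hfix, pvRootOf_fix parent x hpx, if_neg hxr]
      · have hlt : parent x < x := lt_of_le_of_ne (hG x) hpx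
        have hval : parent' x = parent x := by rw [hdef x, if_neg hxr]
        have hne : parent' x ≠ x := by rw [hval]; exact hpx
        rw [pvRootOf_step parent' hG' x hne, hval, ih (parent x) hlt,
          pvRootOf_step parent hG x hpx]

theorem pvUnionF_good (parent : Nat → Nat) (hG : pvGood parent) (a b : Nat) :
    pvGood (pvUnionF parent a b) := by
  unfold pvUnionF
  split_ifs with h1 h2
  · exact hG
  · intro y
    dsimp only
    split_ifs with hy
    · have := (pvRootOf_spec parent hG a).2
      omega
    · exact hG y
  · intro y
    dsimp only
    split_ifs with hy
    · have := (pvRootOf_spec parent hG b).2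
      omega
    · exact hG y

theorem pvUnionF_root (parent : Nat → Nat) (hG : pvGood parent) (a b : Nat) :
    ∀ x, pvRootOf (pvUnionF parent a b) x
      = if pvRootOf parent x = pvRootOf parent a ∨ pvRootOf parent x = pvRootOf parent b
        then min (pvRootOf parent a) (pvRootOf parent b) else pvRootOf parent x := by
  intro x
  have hra := (pvRootOf_spec parent hG a).1
  have hrb := (pvRootOf_spec parent hG b).1
  by_cases h1 : pvRootOf parent a = pvRootOf parent b
  · unfold pvUnionF
    rw [if_pos h1]
    by_cases hx : pvRootOf parent x = pvRootOf parent a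
    · rw [if_pos (Or.inl hx)]; omega
    · rw [if_neg (by rw [← h1]; tauto)]
  · unfold pvUnionF
    rw [if_neg h1]
    by_cases h2 : pvRootOf parent a < pvRootOf parent b
    · rw [if_pos h2]
      rw [pvRoot_update parent
        (fun y => if y = pvRootOf parent b then pvRootOf parent a else parent y)
        hG (pvRootOf parent b) (pvRootOf parent a) (fun y => rfl) hrb hra h2 x]
      by_cases hx2 : pvRootOf parent x = pvRootOf parent b
      · rw [if_pos hx2, if_pos (Or.inr hx2)]; omega
      · rw [if_neg hx2]
        by_cases hx1 : pvRootOf parent x = pvRootOf parent a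
        · rw [if_pos (Or.inl hx1)]; omega
        · rw [if_neg (by tauto)]
    · rw [if_neg h2]
      have h3 : pvRootOf parent b < pvRootOf parent a := by omega
      rw [pvRoot_update parent
        (fun y => if y = pvRootOf parent a then pvRootOf parent b else parent y)
        hG (pvRootOf parent a) (pvRootOf parent b) (fun y => rfl) hra hrb h3 x]
      by_cases hx1 : pvRootOf parent x = pvRootOf parent a
      · rw [if_pos hx1, if_pos (Or.inl hx1)]; omega
      · rw [if_neg hx1]
        by_cases hx2 : pvRootOf parent x = pvRootOf parent b
        · rw [if_pos (Or.inr hx2)]; omega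
        · rw [if_neg (by tauto)]

theorem pvUnionF_pres (parent : Nat → Nat) (hG : pvGood parent) (a b x y : Nat)
    (h : pvRootOf parent x = pvRootOf parent y) :
    pvRootOf (pvUnionF parent a b) x = pvRootOf (pvUnionF parent a b) y := by
  rw [pvUnionF_root parent hG a b x, pvUnionF_root parent hG a b y, h]

theorem pvUnionF_join (parent : Nat → Nat) (hG : pvGood parent) (a b : Nat) :
    pvRootOf (pvUnionF parent a b) a = pvRootOf (pvUnionF parent a b) b := by
  rw [pvUnionF_root parent hG a b a, pvUnionF_root parent hG a b b]
  simp

-- ---------- geometry: encode/decode ----------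

def pvCell (colsN : Nat) (x : Nat) : Int × Int := (((x / colsN : Nat) : Int), ((x % colsN : Nat) : Int))

theorem pvCell_idx (rows cols : Int) (colsN : Nat) (hcols : cols = (colsN : Int))
    (p : Int × Int) (hp : pvInB rows cols p) : pvCell colsN (pvIdx colsN p) = p := by
  obtain ⟨r, c⟩ := p
  obtain ⟨h1, h2, h3, h4⟩ := hp
  have hc : c.toNat < colsN := by omega
  have hdiv : (r.toNat * colsN + c.toNat) / colsN = r.toNat := by
    rw [Nat.add_comm, Nat.add_mul_div_right _ _ (by omega : 0 < colsN),
      Nat.div_eq_of_lt hc, Nat.zero_add]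
  have hmod : (r.toNat * colsN + c.toNat) % colsN = c.toNat := by
    rw [Nat.add_comm, Nat.add_mul_mod_self_right, Nat.mod_eq_of_lt hc]
  simp only [pvCell, pvIdx, hdiv, hmod, Prod.mk.injEq]
  constructor <;> omega

-- ---------- soundness invariant: parent pointers stay inside components ----------

def pvSnd (board : List (List Int)) (rows cols : Int) (colsN : Nat) (parent : Nat → Nat) : Prop :=
  ∀ x, pvReach board rows cols (pvCell colsN x) (pvCell colsN (parent x))

theorem pvSnd_root (board : List (List Int)) (rows cols : Int) (colsN : Nat)
    (parent : Nat → Nat) (hG : pvGood parent) (hS : pvSnd board rows cols colsN parent) :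
    ∀ x, pvReach board rows cols (pvCell colsN x) (pvCell colsN (pvRootOf parent x)) := by
  intro x
  induction x using Nat.strong_induction_on with
  | _ x ih =>
    by_cases hx : parent x = x
    · rw [pvRootOf_fix parent x hx]
      exact Relation.ReflTransGen.refl
    · have hlt : parent x < x := lt_of_le_of_ne (hG x) hx
      rw [pvRootOf_step parent hG x hx]
      exact Relation.ReflTransGen.trans (hS x) (ih (parent x) hlt)

theorem pvUnionF_snd (board : List (List Int)) (rows cols : Int) (colsN : Nat)
    (parent : Nat → Nat) (hG : pvGood parent) (hS : pvSnd board rows cols colsN parent)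
    (a b : Nat) (hab : pvReach board rows cols (pvCell colsN a) (pvCell colsN b)) :
    pvSnd board rows cols colsN (pvUnionF parent a b) := by
  intro x
  unfold pvUnionF
  split_ifs with h1 h2
  · exact hS x
  · dsimp only
    split_ifs with hx
    · subst hx
      exact Relation.ReflTransGen.trans
        (pvReach_symm board rows cols (pvSnd_root board rows cols colsN parent hG hS b))
        (Relation.ReflTransGen.trans (pvReach_symm board rows cols hab)
          (pvSnd_root board rows cols colsN parent hG hS a))
    · exact hS x
  · dsimp only
    split_ifs with hx
    · subst hx
      exact Relation.ReflTransGen.trans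
        (pvReach_symm board rows cols (pvSnd_root board rows cols colsN parent hG hS a))
        (Relation.ReflTransGen.trans hab
          (pvSnd_root board rows cols colsN parent hG hS b))
    · exact hS x

-- ---------- the scan list, and flattening the nested folds ----------

theorem pvFoldl_nested {γ : Type} (f : γ → (Int × Int) → γ) (rs cs : List Int) (init : γ) :
    rs.foldl (fun st r => cs.foldl (fun st c => f st (r, c)) st) init
      = (rs.flatMap (fun r => cs.map (fun c => (r, c)))).foldl f init := by
  induction rs generalizing init with
  | nil => simp
  | cons r rs ih => simp [List.foldl_append, List.foldl_map, ih]

def pvScan (rows cols : Int) : List (Int × Int) :=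
  (PySem.List.pyRange 0 rows 1).flatMap (fun r => (PySem.List.pyRange 0 cols 1).map (fun c => (r, c)))

theorem pvScan_mem (rows cols : Int) (p : Int × Int) :
    p ∈ pvScan rows cols ↔ pvInB rows cols p := by
  simp only [pvScan, List.mem_flatMap, List.mem_map, PySem.List.mem_pyRange_one]
  constructor
  · rintro ⟨r, hr, c, hc, rfl⟩
    exact ⟨hr.1, hr.2, hc.1, hc.2⟩
  · rintro ⟨h1, h2, h3, h4⟩
    exact ⟨p.1, ⟨h1, h2⟩, p.2, ⟨h3, h4⟩, rfl⟩

-- ---------- build pass: roots equal ↔ connected ----------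

def pvEdge (board : List (List Int)) (rows cols : Int) (p q : Int × Int) : Prop :=
  pvEmpty board rows cols p ∧ pvEmpty board rows cols q ∧
    (q = (p.1 + 1, p.2) ∨ q = (p.1, p.2 + 1))

theorem pvBStep_all (board : List (List Int)) (rows cols : Int) (colsN : Nat)
    (hcols : cols = (colsN : Int)) (par : Nat → Nat)
    (hG : pvGood par) (hS : pvSnd board rows cols colsN par)
    (p : Int × Int) (hp : pvInB rows cols p) :
    pvGood (pvBStep board rows cols colsN par p) ∧
    pvSnd board rows cols colsN (pvBStep board rows cols colsN par p) ∧
    (∀ x y, pvRootOf par x = pvRootOf par y →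
      pvRootOf (pvBStep board rows cols colsN par p) x
        = pvRootOf (pvBStep board rows cols colsN par p) y) ∧
    (∀ q, pvEdge board rows cols p q →
      pvRootOf (pvBStep board rows cols colsN par p) (pvIdx colsN p)
        = pvRootOf (pvBStep board rows cols colsN par p) (pvIdx colsN q)) := by
  obtain ⟨hp1, hp2, hp3, hp4⟩ := hp
  by_cases h1 : pvAt board p = some 0
  case neg =>
    simp only [pvBStep, if_neg h1]
    refine ⟨hG, hS, fun x y h => h, ?_⟩
    rintro q ⟨hep, _, _⟩
    exact absurd hep.2 h1
  case pos =>
  have hep : pvEmpty board rows cols p := ⟨⟨hp1, hp2, hp3, hp4⟩, h1⟩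
  by_cases h2 : p.1 + 1 < rows ∧ pvAt board (p.1 + 1, p.2) = some 0
  · have hqd : pvEmpty board rows cols (p.1 + 1, p.2) :=
      ⟨⟨by omega, h2.1, hp3, hp4⟩, h2.2⟩
    have hreachd : pvReach board rows cols (pvCell colsN (pvIdx colsN p))
        (pvCell colsN (pvIdx colsN (p.1 + 1, p.2))) := by
      rw [pvCell_idx rows cols colsN hcols p ⟨hp1, hp2, hp3, hp4⟩,
        pvCell_idx rows cols colsN hcols _ hqd.1]
      exact Relation.ReflTransGen.single ⟨hep, hqd, by simp [pvNbrs]⟩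
    have hG1 : pvGood (pvUnionF par (pvIdx colsN p) (pvIdx colsN (p.1 + 1, p.2))) :=
      pvUnionF_good par hG _ _
    have hS1 : pvSnd board rows cols colsN
        (pvUnionF par (pvIdx colsN p) (pvIdx colsN (p.1 + 1, p.2))) :=
      pvUnionF_snd board rows cols colsN par hG hS _ _ hreachd
    by_cases h3 : p.2 + 1 < cols ∧ pvAt board (p.1, p.2 + 1) = some 0
    · have hqr : pvEmpty board rows cols (p.1, p.2 + 1) :=
        ⟨⟨hp1, hp2, by omega, h3.1⟩, h3.2⟩
      have hreachr : pvReach board rows cols (pvCell colsN (pvIdx colsN p))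
          (pvCell colsN (pvIdx colsN (p.1, p.2 + 1))) := by
        rw [pvCell_idx rows cols colsN hcols p ⟨hp1, hp2, hp3, hp4⟩,
          pvCell_idx rows cols colsN hcols _ hqr.1]
        exact Relation.ReflTransGen.single ⟨hep, hqr, by simp [pvNbrs]⟩
      simp only [pvBStep, if_pos h1, if_pos h2, if_pos h3]
      refine ⟨pvUnionF_good _ hG1 _ _,
        pvUnionF_snd board rows cols colsN _ hG1 hS1 _ _ hreachr,
        fun x y h => pvUnionF_pres _ hG1 _ _ x y (pvUnionF_pres par hG _ _ x y h), ?_⟩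
      rintro q ⟨_, heq, hdir | hdir⟩ <;> subst hdir
      · exact pvUnionF_pres _ hG1 _ _ _ _ (pvUnionF_join par hG _ _)
      · exact pvUnionF_join _ hG1 _ _
    · simp only [pvBStep, if_pos h1, if_pos h2, if_neg h3]
      refine ⟨hG1, hS1, fun x y h => pvUnionF_pres par hG _ _ x y h, ?_⟩
      rintro q ⟨_, heq, hdir | hdir⟩ <;> subst hdir
      · exact pvUnionF_join par hG _ _
      · exact absurd ⟨heq.1.2.2.2, heq.2⟩ h3
  · by_cases h3 : p.2 + 1 < cols ∧ pvAt board (p.1, p.2 + 1) = some 0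
    · have hqr : pvEmpty board rows cols (p.1, p.2 + 1) :=
        ⟨⟨hp1, hp2, by omega, h3.1⟩, h3.2⟩
      have hreachr : pvReach board rows cols (pvCell colsN (pvIdx colsN p))
          (pvCell colsN (pvIdx colsN (p.1, p.2 + 1))) := by
        rw [pvCell_idx rows cols colsN hcols p ⟨hp1, hp2, hp3, hp4⟩,
          pvCell_idx rows cols colsN hcols _ hqr.1]
        exact Relation.ReflTransGen.single ⟨hep, hqr, by simp [pvNbrs]⟩
      simp only [pvBStep, if_pos h1, if_neg h2, if_pos h3]
      refine ⟨pvUnionF_good par hG _ _,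
        pvUnionF_snd board rows cols colsN par hG hS _ _ hreachr,
        fun x y h => pvUnionF_pres par hG _ _ x y h, ?_⟩
      rintro q ⟨_, heq, hdir | hdir⟩ <;> subst hdir
      · exact absurd ⟨heq.1.2.1, heq.2⟩ h2
      · exact pvUnionF_join par hG _ _
    · simp only [pvBStep, if_pos h1, if_neg h2, if_neg h3]
      refine ⟨hG, hS, fun x y h => h, ?_⟩
      rintro q ⟨_, heq, hdir | hdir⟩ <;> subst hdir
      · exact absurd ⟨heq.1.2.1, heq.2⟩ h2
      · exact absurd ⟨heq.1.2.2.2, heq.2⟩ h3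

theorem pvBuild_loop (board : List (List Int)) (rows cols : Int) (colsN : Nat)
    (hcols : cols = (colsN : Int)) :
    ∀ (scan : List (Int × Int)) (par : Nat → Nat),
      (∀ p ∈ scan, pvInB rows cols p) →
      pvGood par → pvSnd board rows cols colsN par →
      pvGood (scan.foldl (pvBStep board rows cols colsN) par) ∧
      pvSnd board rows cols colsN (scan.foldl (pvBStep board rows cols colsN) par) ∧
      (∀ x y, pvRootOf par x = pvRootOf par y →
        pvRootOf (scan.foldl (pvBStep board rows cols colsN) par) x
          = pvRootOf (scan.foldl (pvBStep board rows cols colsN) par) y) ∧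
      (∀ p ∈ scan, ∀ q, pvEdge board rows cols p q →
        pvRootOf (scan.foldl (pvBStep board rows cols colsN) par) (pvIdx colsN p)
          = pvRootOf (scan.foldl (pvBStep board rows cols colsN) par) (pvIdx colsN q)) := by
  intro scan
  induction scan with
  | nil =>
    intro par _ hG hS
    exact ⟨hG, hS, fun x y h => h, by simp⟩
  | cons p rest ih =>
    intro par hscan hG hS
    simp only [List.foldl_cons]
    obtain ⟨g1, s1, m1, e1⟩ := pvBStep_all board rows cols colsN hcols par hG hS p
      (hscan p (List.mem_cons_self ..))
    obtain ⟨G, S, M, E⟩ := ih (pvBStep board rows cols colsN par p)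
      (fun q hq => hscan q (List.mem_cons_of_mem _ hq)) g1 s1
    refine ⟨G, S, fun x y h => M x y (m1 x y h), ?_⟩
    intro x hx q hedge
    rcases List.mem_cons.1 hx with rfl | hx'
    · exact M _ _ (e1 q hedge)
    · exact E x hx' q hedge

theorem pvReq_iff_reach (board : List (List Int)) (rows cols : Int) (colsN : Nat)
    (hcols : cols = (colsN : Int)) (pf : Nat → Nat)
    (hpf : pf = (pvScan rows cols).foldl (pvBStep board rows cols colsN) (fun x => x)) :
    ∀ p q, pvEmpty board rows cols p → pvEmpty board rows cols q →
      (pvRootOf pf (pvIdx colsN p) = pvRootOf pf (pvIdx colsN q) ↔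
        pvReach board rows cols p q) := by
  obtain ⟨hG, hS, _, hE⟩ := pvBuild_loop board rows cols colsN hcols (pvScan rows cols)
    (fun x => x) (fun p hp => (pvScan_mem rows cols p).1 hp)
    (fun y => le_refl y) (fun x => Relation.ReflTransGen.refl)
  rw [← hpf] at hG hS hE
  have hadjreq : ∀ y z, pvAdj board rows cols y z →
      pvRootOf pf (pvIdx colsN y) = pvRootOf pf (pvIdx colsN z) := by
    rintro y z ⟨hey, hez, hmem⟩
    simp only [pvNbrs, List.mem_cons, List.not_mem_nil, or_false] at hmem
    rcases hmem with h | h | h | h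
    · have hyz : y = (z.1 + 1, z.2) := by
        obtain ⟨y1, y2⟩ := y; obtain ⟨z1, z2⟩ := z
        simp only [Prod.mk.injEq] at h ⊢
        constructor <;> omega
      exact (hE z ((pvScan_mem rows cols z).2 hez.1) y ⟨hez, hey, Or.inl hyz⟩).symm
    · exact hE y ((pvScan_mem rows cols y).2 hey.1) z ⟨hey, hez, Or.inl h⟩
    · have hyz : y = (z.1, z.2 + 1) := by
        obtain ⟨y1, y2⟩ := y; obtain ⟨z1, z2⟩ := z
        simp only [Prod.mk.injEq] at h ⊢
        constructor <;> omega
      exact (hE z ((pvScan_mem rows cols z).2 hez.1) y ⟨hez, hey, Or.inr hyz⟩).symm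
    · exact hE y ((pvScan_mem rows cols y).2 hey.1) z ⟨hey, hez, Or.inr h⟩
  intro p q hp hq
  constructor
  · intro heq
    have r1 := pvSnd_root board rows cols colsN pf hG hS (pvIdx colsN p)
    have r2 := pvSnd_root board rows cols colsN pf hG hS (pvIdx colsN q)
    rw [pvCell_idx rows cols colsN hcols p hp.1] at r1
    rw [pvCell_idx rows cols colsN hcols q hq.1] at r2
    rw [heq] at r1
    exact Relation.ReflTransGen.trans r1 (pvReach_symm board rows cols r2)
  · intro hr
    induction hr with
    | refl => rfl
    | tail hstep hadj ih =>
      exact (ih (pvReach_empty board rows cols hp hstep)).trans (hadjreq _ _ hadj)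

-- ---------- border pass characterization ----------

theorem pvBorder_loop (board : List (List Int)) (rows cols : Int) (colsN : Nat) (pf : Nat → Nat) :
    ∀ (scan : List (Int × Int)) (bs : List Nat) (t : Nat),
      t ∈ scan.foldl (pvDStep board rows cols colsN pf) bs ↔
        t ∈ bs ∨ ∃ p ∈ scan, pvAt board p = some 0 ∧ pvIsBorder rows cols p ∧
          pvRootOf pf (pvIdx colsN p) = t := by
  intro scan
  induction scan with
  | nil => intro bs t; simp
  | cons p rest ih =>
    intro bs t
    simp only [List.foldl_cons]
    rw [ih]
    have hsplit : ∀ u : Nat, u ∈ pvDStep board rows cols colsN pf bs p ↔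
        u ∈ bs ∨ (pvAt board p = some 0 ∧ pvIsBorder rows cols p ∧
          pvRootOf pf (pvIdx colsN p) = u) := by
      intro u
      unfold pvDStep pvIsBorder
      split_ifs with h1 h2
      · constructor
        · exact Or.inl
        · rintro (h | ⟨_, _, h⟩)
          · exact h
          · rw [← h]; exact h2
      · simp only [List.mem_cons]
        constructor
        · rintro (rfl | h)
          · exact Or.inr ⟨h1.1, h1.2, rfl⟩
          · exact Or.inl h
        · rintro (h | ⟨_, _, h⟩)
          · exact Or.inr h
          · exact Or.inl h.symm
      · constructor
        · exact Or.inl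
        · rintro (h | ⟨ha, hb, _⟩)
          · exact h
          · exact absurd ⟨ha, hb⟩ h1
    constructor
    · rintro (h | ⟨q, hq, hh⟩)
      · rcases (hsplit t).1 h with h' | h'
        · exact Or.inl h'
        · exact Or.inr ⟨p, List.mem_cons_self .., h'⟩
      · exact Or.inr ⟨q, List.mem_cons_of_mem _ hq, hh⟩
    · rintro (h | ⟨q, hq, hh⟩)
      · exact Or.inl ((hsplit t).2 (Or.inl h))
      · rcases List.mem_cons.1 hq with rfl | hq'
        · exact Or.inl ((hsplit t).2 (Or.inr hh))
        · exact Or.inr ⟨q, hq', hh⟩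

-- ---------- main simulation: A's scan against B's root-collection scan ----------

theorem pvSim (board : List (List Int)) (rows cols : Int) (colsN : Nat)
    (pf : Nat → Nat) (bord : List Nat)
    (hreq : ∀ p q, pvEmpty board rows cols p → pvEmpty board rows cols q →
      (pvRootOf pf (pvIdx colsN p) = pvRootOf pf (pvIdx colsN q) ↔ pvReach board rows cols p q))
    (hbord : ∀ p, pvEmpty board rows cols p →
      (pvRootOf pf (pvIdx colsN p) ∈ bord ↔ pvBord board rows cols p)) :
    ∀ (scan done vis : List (Int × Int)) (h : Int) (rs : List Nat),
      (∀ p ∈ scan, pvInB rows cols p) →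
      pvClosed board rows cols vis →
      (∀ x, x ∈ vis ↔ ∃ q ∈ done, pvEmpty board rows cols q ∧ pvReach board rows cols q x) →
      (∀ t, t ∈ rs ↔ ∃ q ∈ done, pvEmpty board rows cols q ∧ ¬ pvBord board rows cols q ∧
        pvRootOf pf (pvIdx colsN q) = t) →
      (scan.foldl (pvAStep board rows cols) (vis, h)).2 + (rs.length : Int)
        = h + ((scan.foldl (pvRStep board rows cols colsN pf bord) rs).length : Int) := by
  intro scan
  induction scan with
  | nil =>
    intro done vis h rs _ _ _ _
    simp only [List.foldl_nil]
  | cons p rest ih =>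
    intro done vis h rs hscan hCv hvis hrs
    have hpB : pvInB rows cols p := hscan p (List.mem_cons_self ..)
    have hscan' : ∀ x ∈ rest, pvInB rows cols x :=
      fun x hx => hscan x (List.mem_cons_of_mem _ hx)
    simp only [List.foldl_cons]
    by_cases h0 : pvAt board p = some 0
    case neg =>
      have hA : pvAStep board rows cols (vis, h) p = (vis, h) := by
        unfold pvAStep
        rw [if_neg]
        rintro ⟨ha, _⟩
        exact h0 ha
      have hB : pvRStep board rows cols colsN pf bord rs p = rs := by
        unfold pvRStep
        rw [if_neg h0]
      rw [hA, hB]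
      refine ih (p :: done) vis h rs hscan' hCv ?_ ?_
      · intro x
        rw [hvis x]
        constructor
        · rintro ⟨q, hq, he, hh⟩
          exact ⟨q, List.mem_cons_of_mem _ hq, he, hh⟩
        · rintro ⟨q, hq, he, hh⟩
          rcases List.mem_cons.1 hq with rfl | hq'
          · exact absurd he.2 h0
          · exact ⟨q, hq', he, hh⟩
      · intro t
        rw [hrs t]
        constructor
        · rintro ⟨q, hq, he, hh⟩
          exact ⟨q, List.mem_cons_of_mem _ hq, he, hh⟩
        · rintro ⟨q, hq, he, hh⟩
          rcases List.mem_cons.1 hq with rfl | hq'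
          · exact absurd he.2 h0
          · exact ⟨q, hq', he, hh⟩
    case pos =>
    have hep : pvEmpty board rows cols p := ⟨hpB, h0⟩
    by_cases hv : p ∈ vis
    · -- p already flooded by A: both sides are no-ops
      obtain ⟨q0, hq0, he0, hr0⟩ := (hvis p).1 hv
      have hA : pvAStep board rows cols (vis, h) p = (vis, h) := by
        unfold pvAStep
        rw [if_neg]
        rintro ⟨_, hnv⟩
        exact hnv hv
      rw [hA]
      have hvis' : ∀ x, x ∈ vis ↔ ∃ q ∈ p :: done,
          pvEmpty board rows cols q ∧ pvReach board rows cols q x := by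
        intro x
        rw [hvis x]
        constructor
        · rintro ⟨q, hq, he, hh⟩
          exact ⟨q, List.mem_cons_of_mem _ hq, he, hh⟩
        · rintro ⟨q, hq, he, hh⟩
          rcases List.mem_cons.1 hq with rfl | hq'
          · exact (hvis x).1 (pvClosed_reach board rows cols hCv hv hh)
          · exact ⟨q, hq', he, hh⟩
      by_cases hbd : pvBord board rows cols p
      · have hrt : pvRootOf pf (pvIdx colsN p) ∈ bord := (hbord p hep).2 hbd
        have hB : pvRStep board rows cols colsN pf bord rs p = rs := by
          unfold pvRStep
          rw [if_pos h0, if_neg (not_not_intro hrt)]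
        rw [hB]
        refine ih (p :: done) vis h rs hscan' hCv hvis' ?_
        intro t
        rw [hrs t]
        constructor
        · rintro ⟨q, hq, he, hh⟩
          exact ⟨q, List.mem_cons_of_mem _ hq, he, hh⟩
        · rintro ⟨q, hq, he, hh⟩
          rcases List.mem_cons.1 hq with rfl | hq'
          · exact absurd hbd hh.1
          · exact ⟨q, hq', he, hh⟩
      · have hrt : pvRootOf pf (pvIdx colsN p) ∉ bord :=
          fun hmem => hbd ((hbord p hep).1 hmem)
        have hbd0 : ¬ pvBord board rows cols q0 :=
          fun hb => hbd ((pvBord_congr board rows cols hr0).1 hb)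
        have hrtm : pvRootOf pf (pvIdx colsN p) ∈ rs :=
          (hrs _).2 ⟨q0, hq0, he0, hbd0, (hreq q0 p he0 hep).2 hr0⟩
        have hB : pvRStep board rows cols colsN pf bord rs p = rs := by
          unfold pvRStep
          rw [if_pos h0, if_pos hrt, if_pos hrtm]
        rw [hB]
        refine ih (p :: done) vis h rs hscan' hCv hvis' ?_
        intro t
        rw [hrs t]
        constructor
        · rintro ⟨q, hq, he, hh⟩
          exact ⟨q, List.mem_cons_of_mem _ hq, he, hh⟩
        · rintro ⟨q, hq, he, hh⟩
          rcases List.mem_cons.1 hq with rfl | hq'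
          · exact ⟨q0, hq0, he0, hbd0, ((hreq q0 _ he0 hep).2 hr0).trans hh.2⟩
          · exact ⟨q, hq', he, hh⟩
    · -- fresh region: A floods it, B decides by the root
      obtain ⟨c1, c2, c3⟩ := pvBFS_run board rows cols vis p hCv hep hv
      have htch : ((pvBFS board rows cols (p :: vis) [p] [p]).2.any
          (fun q => decide (q.1 = 0 ∨ q.1 = rows - 1 ∨ q.2 = 0 ∨ q.2 = cols - 1))) = true ↔
          pvBord board rows cols p := by
        constructor
        · intro hany
          obtain ⟨x, hx, hfx⟩ := List.any_eq_true.1 hany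
          have hxr : pvReach board rows cols p x := (c2 x).1 hx
          exact ⟨x, by simpa [pvIsBorder] using hfx,
            pvReach_empty board rows cols hep hxr, pvReach_symm board rows cols hxr⟩
        · rintro ⟨b, hbB, hbE, hbR⟩
          exact List.any_eq_true.2 ⟨b, (c2 b).2 (pvReach_symm board rows cols hbR),
            by simpa [pvIsBorder] using hbB⟩
      have hvis' : ∀ x, x ∈ (pvBFS board rows cols (p :: vis) [p] [p]).1 ↔
          ∃ q ∈ p :: done, pvEmpty board rows cols q ∧ pvReach board rows cols q x := by
        intro x
        rw [c1 x]
        constructor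
        · rintro (hx | hx)
          · obtain ⟨q, hq, he, hh⟩ := (hvis x).1 hx
            exact ⟨q, List.mem_cons_of_mem _ hq, he, hh⟩
          · exact ⟨p, List.mem_cons_self .., hep, hx⟩
        · rintro ⟨q, hq, he, hh⟩
          rcases List.mem_cons.1 hq with rfl | hq'
          · exact Or.inr hh
          · exact Or.inl ((hvis x).2 ⟨q, hq', he, hh⟩)
      by_cases hbd : pvBord board rows cols p
      · have htrue := htch.2 hbd
        have hA : pvAStep board rows cols (vis, h) p
            = ((pvBFS board rows cols (p :: vis) [p] [p]).1, h) := by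
          simp only [pvAStep, if_pos (show pvAt board p = some 0 ∧ p ∉ vis from ⟨h0, hv⟩)]
          rw [htrue]
          simp
        have hrt : pvRootOf pf (pvIdx colsN p) ∈ bord := (hbord p hep).2 hbd
        have hB : pvRStep board rows cols colsN pf bord rs p = rs := by
          unfold pvRStep
          rw [if_pos h0, if_neg (not_not_intro hrt)]
        rw [hA, hB]
        refine ih (p :: done) _ h rs hscan' c3 hvis' ?_
        intro t
        rw [hrs t]
        constructor
        · rintro ⟨q, hq, he, hh⟩
          exact ⟨q, List.mem_cons_of_mem _ hq, he, hh⟩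
        · rintro ⟨q, hq, he, hh⟩
          rcases List.mem_cons.1 hq with rfl | hq'
          · exact absurd hbd hh.1
          · exact ⟨q, hq', he, hh⟩
      · have htfalse : ((pvBFS board rows cols (p :: vis) [p] [p]).2.any
            (fun q => decide (q.1 = 0 ∨ q.1 = rows - 1 ∨ q.2 = 0 ∨ q.2 = cols - 1))) = false :=
          Bool.eq_false_iff.2 (fun hany => hbd (htch.1 hany))
        have hA : pvAStep board rows cols (vis, h) p
            = ((pvBFS board rows cols (p :: vis) [p] [p]).1, h + 1) := by
          simp only [pvAStep, if_pos (show pvAt board p = some 0 ∧ p ∉ vis from ⟨h0, hv⟩)]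
          rw [htfalse]
          simp
        have hrt : pvRootOf pf (pvIdx colsN p) ∉ bord :=
          fun hmem => hbd ((hbord p hep).1 hmem)
        have hrtm : pvRootOf pf (pvIdx colsN p) ∉ rs := by
          intro hmem
          obtain ⟨q, hq, he, hnb, hh⟩ := (hrs _).1 hmem
          exact hv ((hvis p).2 ⟨q, hq, he, (hreq q p he hep).1 hh⟩)
        have hB : pvRStep board rows cols colsN pf bord rs p
            = pvRootOf pf (pvIdx colsN p) :: rs := by
          unfold pvRStep
          rw [if_pos h0, if_pos hrt, if_neg hrtm]
        rw [hA, hB]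
        have hrs' : ∀ t, t ∈ pvRootOf pf (pvIdx colsN p) :: rs ↔
            ∃ q ∈ p :: done, pvEmpty board rows cols q ∧ ¬ pvBord board rows cols q ∧
              pvRootOf pf (pvIdx colsN q) = t := by
          intro t
          simp only [List.mem_cons]
          constructor
          · rintro (rfl | ht)
            · exact ⟨p, Or.inl rfl, hep, hbd, rfl⟩
            · obtain ⟨q, hq, he, hh⟩ := (hrs t).1 ht
              exact ⟨q, Or.inr hq, he, hh⟩
          · rintro ⟨q, hq, he, hnb, hh⟩
            rcases hq with rfl | hq'
            · exact Or.inl hh.symm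
            · exact Or.inr ((hrs t).2 ⟨q, hq', he, hnb, hh⟩)
        have := ih (p :: done) _ (h + 1) (pvRootOf pf (pvIdx colsN p) :: rs)
          hscan' c3 hvis' hrs'
        simp only [List.length_cons] at this ⊢
        push_cast at this ⊢
        omega

theorem hole_count_eq_alt (board : List (List Int)) :
    hole_count board = hole_count_alt board := by
  simp only [hole_count, hole_count_alt]
  rw [pvFoldl_nested (pvAStep board (board.length : Int) ((board.headD []).length : Int)),
    pvFoldl_nested (pvBStep board (board.length : Int) ((board.headD []).length : Int)
      (board.headD []).length)]
  rw [pvFoldl_nested, pvFoldl_nested]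
  have hreq := pvReq_iff_reach board (board.length : Int) ((board.headD []).length : Int)
    (board.headD []).length rfl
    ((pvScan (board.length : Int) ((board.headD []).length : Int)).foldl
      (pvBStep board (board.length : Int) ((board.headD []).length : Int) (board.headD []).length)
      (fun x => x)) rfl
  have hbord : ∀ p, pvEmpty board (board.length : Int) ((board.headD []).length : Int) p →
      (pvRootOf ((pvScan (board.length : Int) ((board.headD []).length : Int)).foldl
          (pvBStep board (board.length : Int) ((board.headD []).length : Int)
            (board.headD []).length) (fun x => x)) (pvIdx (board.headD []).length p) ∈
        (pvScan (board.length : Int) ((board.headD []).length : Int)).foldl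
          (pvDStep board (board.length : Int) ((board.headD []).length : Int)
            (board.headD []).length
            ((pvScan (board.length : Int) ((board.headD []).length : Int)).foldl
              (pvBStep board (board.length : Int) ((board.headD []).length : Int)
                (board.headD []).length) (fun x => x))) [] ↔
        pvBord board (board.length : Int) ((board.headD []).length : Int) p) := by
    intro p hp
    rw [pvBorder_loop]
    constructor
    · rintro (h | ⟨b, hbm, hb0, hbB, hbR⟩)
      · simp at h
      · have hbE : pvEmpty board (board.length : Int) ((board.headD []).length : Int) b :=
          ⟨(pvScan_mem _ _ b).1 hbm, hb0⟩
        exact ⟨b, hbB, hbE, (hreq b p hbE hp).1 hbR⟩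
    · rintro ⟨b, hbB, hbE, hbR⟩
      exact Or.inr ⟨b, (pvScan_mem _ _ b).2 hbE.1, hbE.2, hbB, (hreq b p hbE hp).2 hbR⟩
  have hsim := pvSim board (board.length : Int) ((board.headD []).length : Int)
    (board.headD []).length
    ((pvScan (board.length : Int) ((board.headD []).length : Int)).foldl
      (pvBStep board (board.length : Int) ((board.headD []).length : Int)
        (board.headD []).length) (fun x => x))
    ((pvScan (board.length : Int) ((board.headD []).length : Int)).foldl
      (pvDStep board (board.length : Int) ((board.headD []).length : Int)
        (board.headD []).length
        ((pvScan (board.length : Int) ((board.headD []).length : Int)).foldl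
          (pvBStep board (board.length : Int) ((board.headD []).length : Int)
            (board.headD []).length) (fun x => x))) [])
    hreq hbord
    (pvScan (board.length : Int) ((board.headD []).length : Int)) [] [] 0 []
    (fun p hp => (pvScan_mem _ _ p).1 hp)
    (fun p hp => absurd hp (List.not_mem_nil))
    (by intro x; simp)
    (by intro t; simp)
  simp only [List.length_nil, Nat.cast_zero, add_zero, zero_add] at hsim
  simp only [pvScan] at hsim
  omega

-- ===== VERDICT (by name: the statement is the Claim_ definition above) =====
theorem hole_count_spec : Claim_equal_hole_count := by
  intro board _ _
  unfold Spec_hole_count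
  exact hole_count_eq_alt board
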